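-- pv_equiv track=rewrite | github.com/SUDON-NOH/python | Question_2.py | solution
-- ===== SOURCE A (Python) =====
-- def solution(n):
--
--     x = list(range(1, 1000000))
--     a = bin(n).count('1')
--
--     for i in range(len(x)):
--         b = bin(x[i])
--         b = b.count('1')
--         if a == b:
--             answer = x[i]
--
--     return answer
-- ===== SOURCE B (Python) =====
-- def solution(n):
--     # Scan downward from 999999 and return the FIRST number with the same
--     # popcount as n: the answer is the largest such number, so no full pass
--     # and no materialised list is needed.
--     k = bin(n).count('1')
--     for x in range(999999, 0, -1):
--         if bin(x).count('1') == k: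
--             return x
-- ===== Notes on version B (the rewrite author's own statement) =====
-- stated objective: faster
-- what changed: B scans range(999999,0,-1) and returns at the first popcount match (the largest one) instead of materialising list(range(1,1000000)) and doing a full forward pass that keeps overwriting the last match.
-- outside the precondition, e.g. on solution(0): A raises UnboundLocalError, B returns None; on solution(1048575): A raises UnboundLocalError, B returns None
import Mathlib
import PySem

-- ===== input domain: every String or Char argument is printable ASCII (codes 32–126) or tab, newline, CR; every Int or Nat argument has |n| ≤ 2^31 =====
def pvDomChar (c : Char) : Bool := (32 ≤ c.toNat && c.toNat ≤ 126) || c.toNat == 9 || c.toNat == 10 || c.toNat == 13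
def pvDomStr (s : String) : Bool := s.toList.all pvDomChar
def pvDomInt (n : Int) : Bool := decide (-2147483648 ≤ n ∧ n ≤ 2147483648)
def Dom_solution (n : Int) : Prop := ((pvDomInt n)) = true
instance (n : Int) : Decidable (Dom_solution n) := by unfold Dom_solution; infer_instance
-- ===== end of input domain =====

-- B replaces A's full forward pass over a materialised list(range(1,1000000))
-- (keeping the last popcount match) by a downward scan that returns the first
-- match, which is the same (largest) number; early exit instead of 10^6 steps.

-- shared helper: port of bin(v).count('1') applied to |v| ('-', '0', 'b' are
-- never the character '1', so the count is the number of 1-bits of |v|).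
-- SWAR popcount, exact for m < 2^32 — every use here has m ≤ 2^31 (Dom) or
-- m < 10^6 (the loop values).
def binOnes (m : Nat) : Nat :=
  let a := (m &&& 0x55555555) + ((m >>> 1) &&& 0x55555555)
  let b := (a &&& 0x33333333) + ((a >>> 2) &&& 0x33333333)
  let c := (b + (b >>> 4)) &&& 0x0F0F0F0F
  (c * 0x01010101) >>> 24 &&& 0xFF

-- ===== PORT A =====
-- 'answer' starts unassigned (UnboundLocalError if never set): modelled as
-- Option Int, none excluded by Pre_solution; the final 'return answer' is getD 0.
def solution (n : Int) : Int :=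
  let x := PySem.List.pyRange 1 1000000 1
  let a := binOnes n.natAbs
  -- 'for i in range(len(x)): … x[i] …' visits exactly the elements of x in order
  let answer : Option Int :=
    x.foldl
      (fun acc xi =>
        let b := binOnes xi.natAbs
        if a == b then some xi else acc)
      none
  answer.getD 0

-- ===== PORT B =====
-- the fall-off-the-loop case (no match) returns none in Python B; excluded by
-- Pre_solution, getD 0 here.
def solution_alt (n : Int) : Int :=
  let k := binOnes n.natAbs
  ((PySem.List.pyRange 999999 0 (-1)).find?
      (fun x => binOnes x.natAbs == k)).getD 0

-- ===== PRECONDITION & SPEC =====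
-- A raises UnboundLocalError (and Python B returns None, not an int) exactly
-- when no x in 1..999999 has popcount(|n|) bits, i.e. popcount 0 or ≥ 20.
-- closed form: the sum of the binary digits of |n| (its popcount) is 1..19
def Pre_solution (n : Int) : Prop :=
  1 ≤ (Nat.digits 2 n.natAbs).sum ∧ (Nat.digits 2 n.natAbs).sum ≤ 19
instance (n : Int) : Decidable (Pre_solution n) := by unfold Pre_solution; infer_instance
def pvWitness_solution : Int := 7

def Spec_solution (n : Int) (out : Int) : Prop := out = solution_alt n
instance (n : Int) (out : Int) : Decidable (Spec_solution n out) := by unfold Spec_solution; infer_instance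

-- ===== CLAIM (what is proved, stated in full; the proofs are below) =====
def Claim_equal_solution : Prop := ∀ (n : Int), Dom_solution n → Pre_solution n → Spec_solution n (solution n)

-- ===== LEMMAS AND PROOFS =====

-- keeping the last match while folding left = first match of the reversed list
theorem foldl_lastMatch_eq_find_reverse (q : Int → Prop) [DecidablePred q] (l : List Int) (init : Option Int) :
    l.foldl (fun acc x => if q x then some x else acc) init
      = ((l.reverse.find? (fun x => decide (q x))).orElse (fun _ => init)) := by
  induction l generalizing init with
  | nil => simp
  | cons hd tl ih =>
      simp only [List.foldl_cons, ih, List.reverse_cons, List.find?_append]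
      cases h : tl.reverse.find? (fun x => decide (q x)) with
      | some v => simp [Option.orElse]
      | none =>
          simp only [Option.none_or]
          by_cases hp : q hd <;> simp [hp, Option.orElse, List.find?]

theorem solution_spec : Claim_equal_solution := by
  intro n _ _
  unfold Spec_solution solution solution_alt
  simp only [PySem.List.pyRange_neg_one_eq_reverse]
  norm_num
  rw [foldl_lastMatch_eq_find_reverse (fun v => binOnes n.natAbs = binOnes v.natAbs)]
  have hcomm : (fun v : Int => decide (binOnes n.natAbs = binOnes v.natAbs))
      = (fun x : Int => binOnes x.natAbs == binOnes n.natAbs) := by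
    funext v
    by_cases h : binOnes n.natAbs = binOnes v.natAbs
    · rw [h]; simp
    · simp [h, Ne.symm h]
  rw [hcomm]
  cases h : ((PySem.List.pyRange 1 1000000 1).reverse.find?
      (fun x => binOnes x.natAbs == binOnes n.natAbs)) <;> simp [Option.orElse]
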